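-- pv_equiv track=rewrite | github.com/SalomePlatform/sat | src/__init__.py | strSplitN
-- ===== SOURCE A (Python) =====
-- def strSplitN(aList, nb, skip="\n     "):
--     """
--     example
--     aStr = 'this-is-a-string'
--     splitN(aStr, 2, '-')
--     split it by every 2nd '-' rather than every '-'
--     """
--     strValue = ""
--     i = 0
--     for v in aList:
--       strValue += "%15s, " % str(v)
--       i += 1
--       if i >= nb:
--         strValue += skip
--         i = 0
--     if len(aList) > nb:
--         strValue = skip + strValue
--     return strValue
-- ===== SOURCE B (Python) =====
-- def strSplitN(aList, nb, skip="\n     "):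
--     # Chunk-based re-implementation: format all items, join them in chunks of
--     # size nb (1 when nb < 1), with skip after each full chunk.
--     n = nb if nb >= 1 else 1
--     parts = ["%15s, " % str(v) for v in aList]
--     pieces = []
--     while parts:
--         chunk, parts = parts[:n], parts[n:]
--         pieces.append("".join(chunk))
--         if len(chunk) == n:
--             pieces.append(skip)
--     out = "".join(pieces)
--     if len(aList) > nb:
--         out = skip + out
--     return out
-- ===== Notes on version B (the rewrite author's own statement) =====
-- stated objective: alternative
-- what changed: Replaces A's single pass with a running item counter and incremental string growth by a chunking decomposition: format all items first, then split the formatted pieces into groups of nb (1 when nb < 1), joining each group and appending skip after every full group.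
import Mathlib
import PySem

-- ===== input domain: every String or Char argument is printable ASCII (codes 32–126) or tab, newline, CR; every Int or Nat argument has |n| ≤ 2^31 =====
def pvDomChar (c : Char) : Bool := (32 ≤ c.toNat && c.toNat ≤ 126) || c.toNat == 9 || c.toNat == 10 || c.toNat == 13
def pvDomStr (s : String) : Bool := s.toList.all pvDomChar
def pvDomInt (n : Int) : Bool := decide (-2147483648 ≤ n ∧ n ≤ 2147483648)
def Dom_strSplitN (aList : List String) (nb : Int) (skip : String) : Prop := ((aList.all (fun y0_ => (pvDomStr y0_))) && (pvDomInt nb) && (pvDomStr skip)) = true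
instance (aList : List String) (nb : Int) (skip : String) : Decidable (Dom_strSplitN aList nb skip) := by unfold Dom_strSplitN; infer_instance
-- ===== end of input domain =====

-- B replaces A's running item counter by chunking the formatted pieces into groups of nb
-- (objective: alternative decomposition, same cost); both programs are pure, return value only.

-- '"%15s, " % str(v)': right-justify to width 15 with spaces, then ', ' (exact for strings:
-- str(v) = v; PySem has no %-formatting, ported by hand on List Char).
def pyFmt15 (v : String) : List Char :=
  List.replicate (15 - v.toList.length) ' ' ++ v.toList ++ [',', ' ']

-- ===== PORT A =====
-- the loop: state = (strValue, i); after each item i += 1, and when i >= nb append skip, i = 0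
def strSplitN (aList : List String) (nb : Int) (skip : String) : String :=
  let st := aList.foldl (fun (st : List Char × Int) v =>
    let s := st.1 ++ pyFmt15 v
    let i := st.2 + 1
    if nb ≤ i then (s ++ skip.toList, 0) else (s, i)) ([], 0)
  String.ofList (if nb < (aList.length : Int) then skip.toList ++ st.1 else st.1)

-- ===== PORT B =====
-- 'while parts: chunk, parts = parts[:n], parts[n:]; …' with n ≥ 1
def chunkJoin (n : Nat) (skip : List Char) : List (List Char) → List Char
  | [] => []
  | p :: rest =>
    let chunk := p :: rest.take (n - 1)
    chunk.flatten ++ (if chunk.length = n then skip else []) ++ chunkJoin n skip (rest.drop (n - 1))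
termination_by parts => parts.length
decreasing_by simp [List.length_drop]

def strSplitN_alt (aList : List String) (nb : Int) (skip : String) : String :=
  let n : Nat := if 1 ≤ nb then nb.toNat else 1
  let body := chunkJoin n skip.toList (aList.map pyFmt15)
  String.ofList (if nb < (aList.length : Int) then skip.toList ++ body else body)

-- ===== PRECONDITION & SPEC =====
def Spec_strSplitN (aList : List String) (nb : Int) (skip : String) (out : String) : Prop := out = strSplitN_alt aList nb skip
instance (aList : List String) (nb : Int) (skip : String) (out : String) : Decidable (Spec_strSplitN aList nb skip out) := by unfold Spec_strSplitN; infer_instance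

-- ===== CLAIM (what is proved, stated in full; the proofs are below) =====
def Claim_equal_strSplitN : Prop := ∀ (aList : List String) (nb : Int) (skip : String), Dom_strSplitN aList nb skip → Spec_strSplitN aList nb skip (strSplitN aList nb skip)

-- ===== LEMMAS AND PROOFS =====

-- per-element view of B's chunking: c formatted items already placed in the current chunk
def chunkJoinC (n : Nat) (skip : List Char) (c : Nat) : List (List Char) → List Char
  | [] => []
  | p :: rest => p ++ (if c + 1 = n then skip ++ chunkJoinC n skip 0 rest else chunkJoinC n skip (c + 1) rest)

lemma chunkJoinC_eq_chunkJoin (n : Nat) (skip : List Char) :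
    ∀ (parts : List (List Char)) (c : Nat), c < n →
      chunkJoinC n skip c parts =
        (parts.take (n - c)).flatten ++
          (if (parts.take (n - c)).length = n - c then skip else []) ++
          chunkJoin n skip (parts.drop (n - c)) := by
  intro parts
  induction parts with
  | nil =>
    intro c hc
    simp only [chunkJoinC, chunkJoin.eq_1, List.take_nil, List.drop_nil, List.flatten_nil,
      List.length_nil, List.nil_append, List.append_nil]
    rw [if_neg (by omega)]
  | cons p rest ih =>
    intro c hc
    have hnc : n - c = (n - c - 1) + 1 := by omega
    rw [chunkJoinC, hnc, List.take_succ_cons, List.drop_succ_cons]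
    by_cases h : c + 1 = n
    · have h0 : n - c - 1 = 0 := by omega
      simp only [if_pos h, h0, List.take_zero, List.drop_zero, List.flatten_cons,
        List.flatten_nil, List.append_nil, List.length_cons, List.length_nil]
      have : chunkJoinC n skip 0 rest = chunkJoin n skip rest := by
        rcases rest with _ | ⟨q, r⟩
        · simp [chunkJoinC, chunkJoin.eq_1]
        · rw [ih 0 (by omega), chunkJoin.eq_2]
          simp only [Nat.sub_zero]
          have hn1 : n = (n - 1) + 1 := by omega
          rw [hn1]
          simp only [List.take_succ_cons, List.drop_succ_cons, Nat.add_sub_cancel]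
          rfl
      rw [this]
      simp
    · have hc1 : c + 1 < n := by omega
      rw [if_neg h, ih (c + 1) hc1]
      have : n - (c + 1) = n - c - 1 := by omega
      rw [this]
      simp only [List.flatten_cons, List.length_cons]
      have hlen : ((rest.take (n - c - 1)).length + 1 = n - c - 1 + 1) ↔
          ((rest.take (n - c - 1)).length = n - c - 1) := by omega
      by_cases hfull : (rest.take (n - c - 1)).length = n - c - 1
      · rw [if_pos hfull, if_pos (by omega)]
        simp [List.append_assoc]
      · rw [if_neg hfull, if_neg (by omega)]
        simp [List.append_assoc]

lemma foldl_eq_chunkJoinC (nb : Int) (skip : List Char) :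
    ∀ (L : List String) (acc : List Char) (c : Nat),
      c < (if 1 ≤ nb then nb.toNat else 1) →
      (L.foldl (fun (st : List Char × Int) v =>
        let s := st.1 ++ pyFmt15 v
        let i := st.2 + 1
        if nb ≤ i then (s ++ skip, 0) else (s, i)) (acc, (c : Int))).1 =
        acc ++ chunkJoinC (if 1 ≤ nb then nb.toNat else 1) skip c (L.map pyFmt15) := by
  intro L
  induction L with
  | nil => intro acc c hc; simp [chunkJoinC]
  | cons v rest ih =>
    intro acc c hc
    set n := if 1 ≤ nb then nb.toNat else 1 with hn
    simp only [List.foldl_cons, List.map_cons, chunkJoinC]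
    by_cases h : c + 1 = n
    · have hskip : nb ≤ (c : Int) + 1 := by
        by_cases h1 : 1 ≤ nb
        · simp [hn, if_pos h1] at h; omega
        · omega
      rw [if_pos hskip, if_pos h]
      have := ih (acc ++ pyFmt15 v ++ skip) 0 (by omega)
      simpa [List.append_assoc] using this
    · have hnoskip : ¬ nb ≤ (c : Int) + 1 := by
        have h1 : 1 ≤ nb := by
          by_contra h1
          simp [hn, if_neg h1] at hc h
          omega
        simp [hn, if_pos h1] at hc h
        omega
      rw [if_neg hnoskip, if_neg h]
      have hc1 : c + 1 < n := by
        have h1 : 1 ≤ nb := by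
          by_contra h1
          simp [hn, if_neg h1] at hc h; omega
        simp [hn, if_pos h1] at hc h ⊢
        omega
      have := ih (acc ++ pyFmt15 v) (c + 1) hc1
      rw [show ((c : Int) + 1) = ((c + 1 : Nat) : Int) by push_cast; ring, this]
      simp [List.append_assoc]

-- ===== VERDICT (by name: the statement is the Claim_ definition above) =====
theorem strSplitN_spec : Claim_equal_strSplitN := by
  intro aList nb skip _
  unfold Spec_strSplitN strSplitN strSplitN_alt
  set n := if 1 ≤ nb then nb.toNat else 1 with hn
  have hn1 : 1 ≤ n := by rw [hn]; split <;> omega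
  have h1 := foldl_eq_chunkJoinC nb skip.toList aList [] 0 (by omega)
  have h2 : chunkJoinC n skip.toList 0 (aList.map pyFmt15) =
      chunkJoin n skip.toList (aList.map pyFmt15) := by
    rcases h : aList.map pyFmt15 with _ | ⟨q, r⟩
    · simp [chunkJoinC, chunkJoin.eq_1]
    · rw [chunkJoinC_eq_chunkJoin n skip.toList _ 0 (by omega), chunkJoin.eq_2]
      simp only [Nat.sub_zero]
      have hnn : n = (n - 1) + 1 := by omega
      rw [hnn]
      simp only [List.take_succ_cons, List.drop_succ_cons, Nat.add_sub_cancel]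
      rfl
  simp only [← hn] at h1
  rw [show ((0 : Nat) : Int) = (0 : Int) by rfl] at h1
  simp only [h1, List.nil_append, h2]
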